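-- pv_equiv track=rewrite | github.com/spiacy-lin/erpenh | model/hr/hr.py | get_shortest_surname
-- ===== SOURCE A (Python) =====
-- def get_shortest_surname(table):
--     list_of_shortest_surnames = []
--     shortest_surname = len(table[1][1].split()[1])
--     for i in range(2,len(table)):
--         if len(table[i][1].split()[1]) < shortest_surname:
--             shortest_surname = len(table[i][1].split()[1])
--     for j in range(1,len(table)):
--         if len(table[j][1].split()[1]) == shortest_surname:
--             list_of_shortest_surnames.append(table[j][1])
--     list_of_shortest_surnames.sort()
--     return list_of_shortest_surnames
-- ===== SOURCE B (Python) =====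
-- def get_shortest_surname(table):
--     best = None
--     winners = []
--     for row in table[1:]:
--         name = row[1]
--         k = len(name.split()[1])
--         if best is None or k < best:
--             best = k
--             winners = [name]
--         elif k == best:
--             winners.append(name)
--     winners.sort()
--     return winners
-- ===== Notes on version B (the rewrite author's own statement) =====
-- stated objective: alternative
-- what changed: A makes two passes (a scalar-min scan over rows 2.. then a filter scan over rows 1..); B makes one pass over table[1:] maintaining a running best surname length and a winners list that is reset on every strict improvement.
import Mathlib
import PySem

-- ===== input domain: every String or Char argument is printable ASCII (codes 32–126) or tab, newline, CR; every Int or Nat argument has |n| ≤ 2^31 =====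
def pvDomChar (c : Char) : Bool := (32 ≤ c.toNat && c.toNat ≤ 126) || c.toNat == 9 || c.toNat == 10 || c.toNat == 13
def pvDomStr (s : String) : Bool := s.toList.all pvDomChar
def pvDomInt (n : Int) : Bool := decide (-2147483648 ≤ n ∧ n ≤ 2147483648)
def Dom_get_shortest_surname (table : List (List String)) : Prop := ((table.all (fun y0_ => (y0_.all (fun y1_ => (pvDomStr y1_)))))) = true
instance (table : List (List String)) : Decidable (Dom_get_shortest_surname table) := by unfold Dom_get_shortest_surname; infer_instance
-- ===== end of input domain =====

-- B replaces A's two passes (a scalar-min scan, then a filter scan) by ONE pass over table[1:]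
-- keeping a running best surname length and a winners list reset on each strict improvement.

-- ===== PORT A =====
-- row[1] (pvName) and len(row[1].split()[1]) (pvSurLen ∘ pvName), the row reads both programs make
def pvName (row : List String) : String := PySem.List.pyGetD row 1 ""
def pvSurLen (name : String) : Int := PySem.Str.len (PySem.List.pyGetD (PySem.Str.split₀ name) 1 "")
def pvALen (table : List (List String)) (i : Int) : Int := pvSurLen (pvName (PySem.List.pyGetD table i []))

def get_shortest_surname (table : List (List String)) : List String :=
  let shortest0 := pvALen table 1
  let shortest := (PySem.List.pyRange 2 (PySem.List.len table) 1).foldl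
      (fun sh i => if pvALen table i < sh then pvALen table i else sh) shortest0
  let lst := (PySem.List.pyRange 1 (PySem.List.len table) 1).foldl
      (fun acc j => if pvALen table j = shortest then acc ++ [pvName (PySem.List.pyGetD table j [])] else acc)
      ([] : List String)
  PySem.List.sorted lst (fun x => x) false

-- ===== PORT B =====
-- one step of B's loop body over a row: state = (best : Option Int, winners)
def pvBStep (s : Option Int × List String) (row : List String) : Option Int × List String :=
  let name := pvName row
  let k := pvSurLen name
  match s.1 with
  | none => (some k, [name])
  | some b => if k < b then (some k, [name]) else if k = b then (some b, s.2 ++ [name]) else s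

def get_shortest_surname_alt (table : List (List String)) : List String :=
  let st := (PySem.List.slice table (some 1) none).foldl pvBStep (none, [])
  PySem.List.sorted st.2 (fun x => x) false

-- ===== PRECONDITION & SPEC =====
-- Pre_ = exactly the inputs where Python A returns: ≥ 2 rows, and every data row has a
-- second column whose split() has a second token (else A raises IndexError).
def Pre_get_shortest_surname (table : List (List String)) : Prop :=
  2 ≤ table.length ∧ ∀ row ∈ table.drop 1,
    2 ≤ row.length ∧ 2 ≤ (PySem.Str.split₀ (row.getD 1 "")).length
instance (table : List (List String)) : Decidable (Pre_get_shortest_surname table) := by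
  unfold Pre_get_shortest_surname; infer_instance

def pvWitness_get_shortest_surname : List (List String) :=
  [["id", "name"], ["1", "Ann Lee"], ["2", "Bo Kim"]]

def Spec_get_shortest_surname (table : List (List String)) (out : List String) : Prop :=
  out = get_shortest_surname_alt table
instance (table : List (List String)) (out : List String) : Decidable (Spec_get_shortest_surname table out) := by
  unfold Spec_get_shortest_surname; infer_instance

-- ===== CLAIM (what is proved, stated in full; the proofs are below) =====
def Claim_equal_get_shortest_surname : Prop := ∀ (table : List (List String)),
  Dom_get_shortest_surname table → Pre_get_shortest_surname table →
  Spec_get_shortest_surname table (get_shortest_surname table)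

-- ===== LEMMAS AND PROOFS =====

-- A's running-minimum fold, named for the proofs
def pvMin (l : List (List String)) (b : Int) : Int :=
  l.foldl (fun sh r => if pvSurLen (pvName r) < sh then pvSurLen (pvName r) else sh) b

theorem pvMin_le (l : List (List String)) (b : Int) : pvMin l b ≤ b := by
  induction l generalizing b with
  | nil => simp [pvMin]
  | cons y u ih =>
      unfold pvMin
      rw [List.foldl_cons]
      by_cases h : pvSurLen (pvName y) < b
      · rw [if_pos h]; exact le_trans (ih (pvSurLen (pvName y))) (le_of_lt h)
      · rw [if_neg h]; exact ih b

-- fold over indexed reads = fold over the list itself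
theorem pv_foldl_range_getD {α β : Type} (xs : List α) (d : α) (g : β → α → β) (init : β) :
    (List.range xs.length).foldl (fun b k => g b (xs.getD k d)) init = xs.foldl g init := by
  induction xs generalizing init with
  | nil => rfl
  | cons x t ih =>
      simp only [List.length_cons, List.range_succ_eq_map, List.foldl_cons, List.foldl_map,
        List.getD_cons_zero, List.getD_cons_succ]
      exact ih (g init x)

theorem pv_foldl_range_getD_off {α β : Type} (xs : List α) (a : Nat) (d : α) (g : β → α → β) (init : β) :
    (List.range (xs.length - a)).foldl (fun b k => g b (xs.getD (a + k) d)) init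
      = (xs.drop a).foldl g init := by
  have h : ∀ k, xs.getD (a + k) d = (xs.drop a).getD k d := by
    intro k
    simp [List.getD, List.getElem?_drop]
  simp only [h]
  have := pv_foldl_range_getD (xs.drop a) d g init
  simpa [List.length_drop] using this

-- B's loop invariant: from state (some b, ws), the fold computes the running minimum pvMin l b
-- and winners = (ws if no strict improvement happened, else []) ++ names whose surname length is the minimum.
theorem pvB_invariant (l : List (List String)) (b : Int) (ws : List String) :
    l.foldl pvBStep (some b, ws)
      = (some (pvMin l b),
         (if pvMin l b = b then ws else []) ++
         ((l.filter (fun r => pvSurLen (pvName r) == pvMin l b)).map pvName)) := by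
  induction l generalizing b ws with
  | nil => simp [pvMin]
  | cons x t ih =>
      rw [List.foldl_cons]
      by_cases h1 : pvSurLen (pvName x) < b
      · have hMcons : pvMin (x :: t) b = pvMin t (pvSurLen (pvName x)) := by
          unfold pvMin; rw [List.foldl_cons, if_pos h1]
        have hstep : pvBStep (some b, ws) x = (some (pvSurLen (pvName x)), [pvName x]) := by
          simp [pvBStep, h1]
        have hMb : pvMin t (pvSurLen (pvName x)) ≠ b := by
          have := pvMin_le t (pvSurLen (pvName x)); omega
        rw [hstep, ih]
        simp only [hMcons, if_neg hMb, List.filter_cons]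
        by_cases h2 : pvMin t (pvSurLen (pvName x)) = pvSurLen (pvName x)
        · simp [h2]
        · have hx : ¬ (pvSurLen (pvName x) == pvMin t (pvSurLen (pvName x))) = true := by
            simp only [beq_iff_eq]
            exact fun he => h2 he.symm
          simp [h2, hx]
      · by_cases h2 : pvSurLen (pvName x) = b
        · have hMcons : pvMin (x :: t) b = pvMin t b := by
            unfold pvMin; rw [List.foldl_cons, if_neg h1]
          have hstep : pvBStep (some b, ws) x = (some b, ws ++ [pvName x]) := by
            simp [pvBStep, h2]
          rw [hstep, ih]
          simp only [hMcons, List.filter_cons]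
          by_cases h3 : pvMin t b = b
          · simp [h3, h2]
          · have hx : ¬ (pvSurLen (pvName x) == pvMin t b) = true := by
              simp only [beq_iff_eq, h2]
              exact fun he => h3 he.symm
            simp [h3, hx]
        · have hMcons : pvMin (x :: t) b = pvMin t b := by
            unfold pvMin; rw [List.foldl_cons, if_neg h1]
          have hstep : pvBStep (some b, ws) x = (some b, ws) := by
            simp [pvBStep, h1, h2]
          rw [hstep, ih]
          have hx : ¬ (pvSurLen (pvName x) == pvMin t b) = true := by
            have := pvMin_le t b; simp; omega
          simp only [hMcons, List.filter_cons, hx]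
          simp

-- ===== VERDICT (by name: the statement is the Claim_ definition above) =====
theorem get_shortest_surname_spec : Claim_equal_get_shortest_surname := by
  intro table _hdom hpre
  obtain ⟨hlen, _⟩ := hpre
  obtain ⟨h0, r, rs, rfl⟩ : ∃ h0 r rs, table = h0 :: r :: rs := by
    match table, hlen with
    | h0 :: r :: rs, _ => exact ⟨h0, r, rs, rfl⟩
  unfold Spec_get_shortest_surname get_shortest_surname get_shortest_surname_alt
  -- A's two range folds become folds over the dropped table
  have hA1 : (PySem.List.pyRange 2 (PySem.List.len (h0 :: r :: rs)) 1).foldl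
      (fun sh i => if pvALen (h0 :: r :: rs) i < sh then pvALen (h0 :: r :: rs) i else sh) (pvALen (h0 :: r :: rs) 1)
      = pvMin rs (pvALen (h0 :: r :: rs) 1) := by
    rw [PySem.List.len_eq, PySem.List.pyRange_one]
    have hcast : ∀ k : Nat, ((2 : Int) + (k : Int)) = ((2 + k : Nat) : Int) := by intro k; push_cast; ring
    have hlen2 : (((h0 :: r :: rs).length : Int) - 2).toNat = (h0 :: r :: rs).length - 2 := by
      simp only [List.length_cons]; omega
    rw [hlen2]
    have := pv_foldl_range_getD_off (h0 :: r :: rs) 2 ([] : List String)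
      (fun sh r => if pvSurLen (pvName r) < sh then pvSurLen (pvName r) else sh) (pvALen (h0 :: r :: rs) 1)
    simp only [List.drop_succ_cons, List.drop_zero] at this
    unfold pvMin
    rw [← this]
    simp only [List.foldl_map, pvALen, hcast, PySem.List.pyGetD_natCast]
  have hA2 : ∀ (m : Int), (PySem.List.pyRange 1 (PySem.List.len (h0 :: r :: rs)) 1).foldl
      (fun acc j => if pvALen (h0 :: r :: rs) j = m then acc ++ [pvName (PySem.List.pyGetD (h0 :: r :: rs) j [])] else acc) ([] : List String)
      = (r :: rs).foldl (fun acc row => if pvSurLen (pvName row) = m then acc ++ [pvName row] else acc) [] := by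
    intro m
    rw [PySem.List.len_eq, PySem.List.pyRange_one]
    have hcast : ∀ k : Nat, ((1 : Int) + (k : Int)) = ((1 + k : Nat) : Int) := by intro k; push_cast; ring
    have hlen1 : (((h0 :: r :: rs).length : Int) - 1).toNat = (h0 :: r :: rs).length - 1 := by
      simp only [List.length_cons]; omega
    rw [hlen1]
    have := pv_foldl_range_getD_off (h0 :: r :: rs) 1 ([] : List String)
      (fun acc row => if pvSurLen (pvName row) = m then acc ++ [pvName row] else acc) ([] : List String)
    simp only [List.drop_succ_cons, List.drop_zero] at this
    rw [← this]
    simp only [List.foldl_map, pvALen, hcast, PySem.List.pyGetD_natCast]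
  have hget1 : pvALen (h0 :: r :: rs) 1 = pvSurLen (pvName r) := by
    have : PySem.List.pyGetD (h0 :: r :: rs) (1 : Int) ([] : List String) = r := by simp [pysem]
    rw [pvALen, this]
  have hslice : PySem.List.slice (h0 :: r :: rs) (some 1) none = r :: rs := by
    simpa using PySem.List.slice_from_natCast (h0 :: r :: rs) 1
  have hstep0 : pvBStep (none, ([] : List String)) r = (some (pvSurLen (pvName r)), [pvName r]) := by
    simp [pvBStep]
  rw [hget1] at hA1
  have hAlist : ∀ (m : Int), (r :: rs).foldl
      (fun acc row => if pvSurLen (pvName row) = m then acc ++ [pvName row] else acc) ([] : List String)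
      = ((r :: rs).filter (fun row => pvSurLen (pvName row) == m)).map pvName := by
    intro m
    have := PySem.List.foldl_append_if (fun row => pvSurLen (pvName row) == m) pvName (r :: rs) []
    simpa using this
  have hB : (r :: rs).foldl pvBStep (none, ([] : List String))
      = (some (pvMin rs (pvSurLen (pvName r))),
         (if pvMin rs (pvSurLen (pvName r)) = pvSurLen (pvName r) then [pvName r] else []) ++
         ((rs.filter (fun row => pvSurLen (pvName row) == pvMin rs (pvSurLen (pvName r)))).map pvName)) := by
    rw [List.foldl_cons, hstep0, pvB_invariant]
  simp only [hget1, hA1, hA2, hAlist, hslice, hB]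
  -- both sides are sorts of the same list
  congr 1
  rw [List.filter_cons]
  by_cases hM : pvMin rs (pvSurLen (pvName r)) = pvSurLen (pvName r)
  · simp [hM]
  · have hx : ¬ (pvSurLen (pvName r) == pvMin rs (pvSurLen (pvName r))) = true := by
      simp only [beq_iff_eq]
      exact fun he => hM he.symm
    simp [hx, hM]
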